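-- pv_equiv track=rewrite | github.com/thombehrens/py-anagram | anagram-v3.py | find_valid_pairs
-- ===== SOURCE A (Python) =====
-- from collections import Counter
--
-- def find_valid_pairs(valid_words, anagram_word):
--     valid_pairs = []
--     for index, word in enumerate(valid_words):
--         first_word = word.lower()
--         i = index + 1
--         while i < len(valid_words):
--             second_word = valid_words[i].lower()
--             if Counter(first_word + second_word) == Counter(anagram_word):
--                 valid_pairs.append((first_word, second_word))
--             i += 1
--     return valid_pairs
-- ===== SOURCE B (Python) =====
-- def _msub(t, s):
--     # multiset difference t - s of two ascending-sorted char lists; None if s is not contained in t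
--     res = []
--     k = 0
--     for c in s:
--         while k < len(t) and t[k] < c:
--             res.append(t[k])
--             k += 1
--         if k < len(t) and t[k] == c:
--             k += 1
--         else:
--             return None
--     res.extend(t[k:])
--     return res
--
-- def find_valid_pairs(valid_words, anagram_word):
--     lowered = [w.lower() for w in valid_words]
--     target = sorted(anagram_word)
--     buckets = {}
--     for j, w in enumerate(lowered):
--         buckets.setdefault(tuple(sorted(w)), []).append(j)
--     pairs = []
--     for i, w in enumerate(lowered):
--         comp = _msub(target, sorted(w))
--         if comp is not None:
--             for j in buckets.get(tuple(comp), []):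
--                 if i < j:
--                     pairs.append((w, lowered[j]))
--     return pairs
-- ===== Notes on version B (the rewrite author's own statement) =====
-- stated objective: faster
-- what changed: Replaces the O(n^2) all-pairs Counter comparison by indexing words under their sorted-letters signature and, per word, a sorted-multiset subtraction of the target followed by one bucket lookup of the complement signature.
import Mathlib
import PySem

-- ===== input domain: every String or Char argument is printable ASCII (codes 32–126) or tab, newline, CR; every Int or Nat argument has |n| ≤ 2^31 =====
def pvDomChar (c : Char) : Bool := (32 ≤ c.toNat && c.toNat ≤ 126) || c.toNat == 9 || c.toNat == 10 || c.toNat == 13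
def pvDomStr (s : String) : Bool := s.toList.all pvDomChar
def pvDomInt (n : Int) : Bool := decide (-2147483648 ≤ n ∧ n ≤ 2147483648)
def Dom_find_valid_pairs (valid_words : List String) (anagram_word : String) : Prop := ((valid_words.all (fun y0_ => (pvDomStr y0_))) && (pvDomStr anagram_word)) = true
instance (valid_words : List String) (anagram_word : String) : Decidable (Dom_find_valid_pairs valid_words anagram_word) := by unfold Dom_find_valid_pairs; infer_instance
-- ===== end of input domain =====

-- B replaces A's all-pairs Counter comparison by a signature index plus per-word complement lookup (faster; measured asymptotic speed-up).

-- ===== PORT A =====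
-- Python's `Counter(x) == Counter(y)`: dict equality ignoring insertion order.
def counterEq (d1 d2 : PySem.Dict Char Int) : Bool :=
  d1.items.all (fun p => d2.getD p.1 0 == p.2) && d2.items.all (fun p => d1.getD p.1 0 == p.2)

def find_valid_pairs (valid_words : List String) (anagram_word : String) : List (String × String) :=
  (PySem.List.enumerate valid_words 0).foldl (fun valid_pairs p =>
    let first_word := PySem.Str.lower p.2
    -- `i = index + 1; while i < len(valid_words): … i += 1` = for i in range(index+1, len(valid_words))
    (PySem.List.pyRange (p.1 + 1) (PySem.List.len valid_words) 1).foldl (fun vp i =>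
      let second_word := PySem.Str.lower (PySem.List.pyGetD valid_words i "")
      if counterEq (PySem.Dict.counter (first_word.toList ++ second_word.toList))
                   (PySem.Dict.counter anagram_word.toList)
      then vp ++ [(first_word, second_word)] else vp) valid_pairs) []

-- ===== PORT B =====
-- `_msub`: inner `while k < len(t) and t[k] < c …` of Source B (state: emitted prefix `res`, rest of t)
def msubInner (t : List Char) (c : Char) (res : List Char) : Option (List Char × List Char) :=
  match t with
  | [] => none
  | a :: t' =>
      if a < c then msubInner t' c (res ++ [a])
      else if a = c then some (res, t') else none

-- `_msub`: outer `for c in s` loop; `some (res ++ t)` is the final `res.extend(t[k:])`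
def msubLoop (s t res : List Char) : Option (List Char) :=
  match s with
  | [] => some (res ++ t)
  | c :: s' =>
      match msubInner t c res with
      | none => none
      | some (res', t') => msubLoop s' t' res'

def msub (t s : List Char) : Option (List Char) := msubLoop s t []

def find_valid_pairs_alt (valid_words : List String) (anagram_word : String) : List (String × String) :=
  let lowered := valid_words.map PySem.Str.lower
  let target := PySem.List.sorted anagram_word.toList (fun x => x) false
  let buckets := (PySem.List.enumerate lowered 0).foldl
    (fun d p => d.modify (PySem.List.sorted ((p.2 : String)).toList (fun x => x) false) [] (· ++ [p.1]))
    PySem.Dict.empty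
  (PySem.List.enumerate lowered 0).foldl (fun pairs p =>
    match msub target (PySem.List.sorted ((p.2 : String)).toList (fun x => x) false) with
    | none => pairs
    | some comp =>
        (buckets.getD comp []).foldl (fun ps j =>
          if p.1 < j then ps ++ [(p.2, PySem.List.pyGetD lowered j "")] else ps) pairs) []

-- ===== PRECONDITION & SPEC =====
def Spec_find_valid_pairs (valid_words : List String) (anagram_word : String) (out : List (String × String)) : Prop := out = find_valid_pairs_alt valid_words anagram_word
instance (valid_words : List String) (anagram_word : String) (out : List (String × String)) : Decidable (Spec_find_valid_pairs valid_words anagram_word out) := by unfold Spec_find_valid_pairs; infer_instance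

-- ===== CLAIM (what is proved, stated in full; the proofs are below) =====
def Claim_equal_find_valid_pairs : Prop := ∀ (valid_words : List String) (anagram_word : String), Dom_find_valid_pairs valid_words anagram_word → Spec_find_valid_pairs valid_words anagram_word (find_valid_pairs valid_words anagram_word)

-- ===== LEMMAS AND PROOFS =====
lemma counterEq_iff (xs ys : List Char) :
    counterEq (PySem.Dict.counter xs) (PySem.Dict.counter ys) = true ↔ xs.Perm ys := by
  unfold counterEq
  simp only [Bool.and_eq_true, List.all_eq_true, PySem.Dict.items_counter, List.mem_map,
    PySem.Dict.getD_counter, beq_iff_eq]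
  constructor
  · rintro ⟨h1, h2⟩
    rw [List.perm_iff_count]
    intro c
    by_cases hx : c ∈ xs
    · have := h1 _ ⟨c, (PySem.Set.mem_ofList _ _).mpr hx, rfl⟩
      simp only [] at this
      exact_mod_cast this.symm
    · by_cases hy : c ∈ ys
      · have := h2 _ ⟨c, (PySem.Set.mem_ofList _ _).mpr hy, rfl⟩
        simp only [] at this
        exact_mod_cast this
      · simp [List.count_eq_zero_of_not_mem, hx, hy]
  · intro h
    have hc := List.perm_iff_count.mp h
    constructor
    · rintro p ⟨c, _, rfl⟩; simp [hc c]
    · rintro p ⟨c, _, rfl⟩; simp [hc c]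

lemma msubInner_some {t : List Char} {c : Char} {res res' t' : List Char}
    (h : msubInner t c res = some (res', t')) :
    ∃ pre, t = pre ++ c :: t' ∧ res' = res ++ pre := by
  induction t generalizing res with
  | nil => simp [msubInner] at h
  | cons a tl ih =>
    rw [msubInner] at h
    split_ifs at h with h1 h2
    · obtain ⟨pre, hpre, hres⟩ := ih h
      exact ⟨a :: pre, by simp [hpre], by simp [hres]⟩
    · subst h2
      simp at h
      exact ⟨[], by simp [h.2], by simp [h.1]⟩

lemma msubLoop_some {s : List Char} : ∀ {t res r : List Char},
    msubLoop s t res = some r → ∃ u, r = res ++ u ∧ u.Sublist t ∧ (s ++ u).Perm t := by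
  induction s with
  | nil =>
    intro t res r h
    rw [msubLoop] at h
    exact ⟨t, by simpa using h.symm, List.Sublist.refl t, by simp⟩
  | cons c s' ih =>
    intro t res r h
    rw [msubLoop] at h
    cases hin : msubInner t c res with
    | none => rw [hin] at h; simp at h
    | some q =>
      rw [hin] at h
      obtain ⟨pre, ht, hres'⟩ := msubInner_some (t' := q.2) (res' := q.1) (by simpa using hin)
      obtain ⟨u, hr, hsub, hperm⟩ := ih h
      subst ht
      refine ⟨pre ++ u, by simp [hr, hres'], ?_, ?_⟩
      · exact List.Sublist.append_left (hsub.trans (List.sublist_cons_self _ _)) _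
      · refine (List.Perm.trans ?_ List.perm_middle.symm)
        show (c :: (s' ++ (pre ++ u))).Perm (c :: (pre ++ q.2))
        exact ((List.perm_append_comm_assoc s' pre u).trans (hperm.append_left pre)).cons c

lemma msubInner_complete {t : List Char} {c : Char} {s' : List Char} (res : List Char)
    (ht : t.Pairwise (· ≤ ·)) (hs : ∀ x ∈ s', c ≤ x) (hsub : (c :: s').Subperm t) :
    ∃ res' t', msubInner t c res = some (res', t') ∧ t'.Pairwise (· ≤ ·) ∧ s'.Subperm t' := by
  induction t generalizing res with
  | nil => exact absurd (hsub.subset (List.mem_cons_self)) (List.not_mem_nil)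
  | cons a tl ih =>
    rw [msubInner]
    rcases lt_trichotomy a c with h1 | h1 | h1
    · rw [if_pos h1]
      refine ih (res ++ [a]) ht.of_cons ?_
      rw [List.subperm_ext_iff] at hsub ⊢
      intro x hx
      have hxa : x ≠ a := by
        rcases List.mem_cons.mp hx with rfl | hx'
        · exact fun he => absurd (he ▸ h1) (lt_irrefl _)
        · exact fun he => absurd (he ▸ lt_of_lt_of_le h1 (hs x hx')) (lt_irrefl _)
      have := hsub x hx
      simp only [List.count_cons, beq_iff_eq] at this ⊢
      simp only [if_neg (Ne.symm hxa), add_zero] at this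
      omega
    · subst h1
      rw [if_neg (lt_irrefl a), if_pos rfl]
      refine ⟨res, tl, rfl, ht.of_cons, ?_⟩
      rw [List.subperm_ext_iff] at hsub ⊢
      intro x hx
      have := hsub x (List.mem_cons_of_mem a hx)
      by_cases hxc : x = a
      · subst hxc; simpa using this
      · simp only [List.count_cons, beq_iff_eq] at this
        simp only [if_neg (Ne.symm hxc), add_zero] at this
        omega
    · exfalso
      have hc : c ∈ a :: tl := hsub.subset List.mem_cons_self
      rcases List.mem_cons.mp hc with rfl | hc'
      · exact lt_irrefl _ h1
      · exact absurd (List.rel_of_pairwise_cons ht hc') (not_le.mpr h1)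

lemma msubLoop_complete {s : List Char} : ∀ {t : List Char} (res : List Char),
    t.Pairwise (· ≤ ·) → s.Pairwise (· ≤ ·) → s.Subperm t →
    ∃ r, msubLoop s t res = some r := by
  induction s with
  | nil => intro t res _ _ _; exact ⟨res ++ t, rfl⟩
  | cons c s' ih =>
    intro t res ht hs hsub
    obtain ⟨res', t', hin, ht', hsub'⟩ :=
      msubInner_complete res ht (fun x hx => List.rel_of_pairwise_cons hs hx) hsub
    obtain ⟨r, hr⟩ := ih res' ht' hs.of_cons hsub'
    exact ⟨r, by rw [msubLoop, hin]; exact hr⟩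

-- sorted-with-identity-key shorthand facts
lemma sortC_perm (l : List Char) : (PySem.List.sorted l (fun x => x) false).Perm l :=
  PySem.List.sorted_perm l (fun x => x) false

lemma sortC_pairwise (l : List Char) :
    (PySem.List.sorted l (fun x => x) false).Pairwise (· ≤ ·) :=
  PySem.List.sorted_pairwise l (fun x => x)

lemma no_match (fw lj aw : List Char)
    (h : msub (PySem.List.sorted aw (fun x => x) false)
              (PySem.List.sorted fw (fun x => x) false) = none) :
    ¬ (fw ++ lj).Perm aw := by
  intro hp
  have hchain : ((PySem.List.sorted fw (fun x => x) false) ++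
      (PySem.List.sorted lj (fun x => x) false)).Perm
      (PySem.List.sorted aw (fun x => x) false) :=
    (((sortC_perm fw).append (sortC_perm lj)).trans hp).trans (sortC_perm aw).symm
  have hsp : (PySem.List.sorted fw (fun x => x) false).Subperm
      (PySem.List.sorted aw (fun x => x) false) :=
    ((List.sublist_append_left _ _).subperm).trans hchain.subperm
  obtain ⟨r, hr⟩ := msubLoop_complete [] (sortC_pairwise aw) (sortC_pairwise fw) hsp
  rw [msub] at h
  rw [h] at hr
  exact absurd hr (by simp)

lemma matches_iff (fw lj aw : List Char) {r : List Char}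
    (h : msub (PySem.List.sorted aw (fun x => x) false)
              (PySem.List.sorted fw (fun x => x) false) = some r) :
    ((fw ++ lj).Perm aw ↔ PySem.List.sorted lj (fun x => x) false = r) := by
  rw [msub] at h
  obtain ⟨u, hru, hsub, hperm⟩ := msubLoop_some h
  simp only [List.nil_append] at hru
  subst hru
  constructor
  · intro hp
    have hchain : ((PySem.List.sorted fw (fun x => x) false) ++
        (PySem.List.sorted lj (fun x => x) false)).Perm
        ((PySem.List.sorted fw (fun x => x) false) ++ r) :=
      ((((sortC_perm fw).append (sortC_perm lj)).trans hp).trans (sortC_perm aw).symm).trans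
        hperm.symm
    have hpr := (List.perm_append_left_iff _).mp hchain
    exact PySem.List.eq_of_perm_of_pairwise_le_of_injective (fun x => x)
      Function.injective_id hpr (sortC_pairwise lj) ((sortC_pairwise aw).sublist hsub)
  · intro he
    have hlr : lj.Perm r := (sortC_perm lj).symm.trans (he ▸ List.Perm.refl _)
    exact (((sortC_perm fw).symm.append hlr).trans hperm).trans (sortC_perm aw)

def blockA (vw : List String) (aw : String) (p : Int × String) : List (String × String) :=
  ((PySem.List.pyRange (p.1 + 1) (PySem.List.len vw) 1).filter
      (fun i => counterEq
        (PySem.Dict.counter ((PySem.Str.lower p.2).toList ++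
          (PySem.Str.lower (PySem.List.pyGetD vw i "")).toList))
        (PySem.Dict.counter aw.toList))).map
    (fun i => (PySem.Str.lower p.2, PySem.Str.lower (PySem.List.pyGetD vw i "")))

def bucketsOf (li : List String) : PySem.Dict (List Char) (List Int) :=
  (PySem.List.enumerate li 0).foldl
    (fun d p => d.modify (PySem.List.sorted p.2.toList (fun x => x) false) [] (· ++ [p.1]))
    PySem.Dict.empty

def blockB (li : List String) (aw : String) (p : Int × String) : List (String × String) :=
  match msub (PySem.List.sorted aw.toList (fun x => x) false)
             (PySem.List.sorted p.2.toList (fun x => x) false) with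
  | none => []
  | some comp =>
      (((bucketsOf li).getD comp []).filter (fun j => p.1 < j)).map
        (fun j => (p.2, PySem.List.pyGetD li j ""))

lemma A_eq (vw : List String) (aw : String) :
    find_valid_pairs vw aw = (PySem.List.enumerate vw 0).flatMap (blockA vw aw) := by
  unfold find_valid_pairs
  rw [PySem.List.foldl_congr_mem _ _ (fun acc p => acc ++ blockA vw aw p) _
    (fun acc p _ => PySem.List.foldl_append_if _ _ _ acc)]
  exact PySem.List.foldl_append_eq_flatMap _ _ _

lemma B_eq (vw : List String) (aw : String) :
    find_valid_pairs_alt vw aw =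
      (PySem.List.enumerate (vw.map PySem.Str.lower) 0).flatMap
        (blockB (vw.map PySem.Str.lower) aw) := by
  unfold find_valid_pairs_alt
  rw [PySem.List.foldl_congr_mem _ _
    (fun acc p => acc ++ blockB (vw.map PySem.Str.lower) aw p) _ ?_]
  · exact PySem.List.foldl_append_eq_flatMap _ _ _
  · intro acc p _
    show _ = acc ++ blockB _ _ _
    unfold blockB
    cases hm : msub (PySem.List.sorted aw.toList (fun x => x) false)
        (PySem.List.sorted p.2.toList (fun x => x) false) with
    | none => simp
    | some comp =>
      unfold bucketsOf
      simpa using PySem.List.foldl_append_if (fun j => decide (p.1 < j))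
        (fun j => (p.2, PySem.List.pyGetD (List.map PySem.Str.lower vw) j ""))
        ((List.foldl (fun d p => d.modify (PySem.List.sorted p.2.toList fun x => x) []
            fun x => x ++ [p.1]) PySem.Dict.empty
          (PySem.List.enumerate (List.map PySem.Str.lower vw))).getD comp []) acc

lemma bucketsOf_getD (li : List String) (c : List Char) :
    (bucketsOf li).getD c [] =
      ((PySem.List.enumerate li 0).filter
        (fun p => PySem.List.sorted p.2.toList (fun x => x) false == c)).map (fun p => p.1) := by
  unfold bucketsOf
  rw [← List.foldl_map
    (f := fun p : Int × String => (PySem.List.sorted p.2.toList (fun x => x) false, p.1))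
    (g := fun (d : PySem.Dict (List Char) (List Int)) q => d.modify q.1 [] (· ++ [q.2]))]
  rw [PySem.Dict.getD_foldl_modify_append]
  simp [List.filter_map, List.map_map, Function.comp_def]

lemma enumerate_map {α β : Type} (f : α → β) (xs : List α) (s : Int) :
    PySem.List.enumerate (xs.map f) s =
      (PySem.List.enumerate xs s).map (fun p => (p.1, f p.2)) := by
  induction xs generalizing s with
  | nil => simp [PySem.List.enumerate_nil]
  | cons x tl ih => simp [PySem.List.enumerate_cons, ih]

set_option maxHeartbeats 2000000 in
lemma block_eq (vw : List String) (aw : String) (k : Nat) (hk : k < vw.length) :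
    blockA vw aw ((k : Int), vw[k]) =
      blockB (vw.map PySem.Str.lower) aw ((k : Int), PySem.Str.lower vw[k]) := by
  unfold blockA blockB
  cases hm : msub (PySem.List.sorted aw.toList (fun x => x) false)
      (PySem.List.sorted (PySem.Str.lower vw[k]).toList (fun x => x) false) with
  | none =>
    have hnil : List.filter (fun i => counterEq
        (PySem.Dict.counter ((PySem.Str.lower vw[k]).toList ++
          (PySem.Str.lower (PySem.List.pyGetD vw i "")).toList))
        (PySem.Dict.counter aw.toList))
        (PySem.List.pyRange ((k : Int) + 1) (PySem.List.len vw) 1) = [] := by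
      apply List.filter_eq_nil_iff.mpr
      intro i _
      rw [counterEq_iff]
      exact no_match _ _ _ hm
    rw [hnil, List.map_nil]
  | some r =>
    dsimp only
    rw [bucketsOf_getD]
    rw [PySem.List.enumerate_eq_map_pyRange (vw.map PySem.Str.lower) ""]
    rw [List.filter_map, List.map_map]
    rw [List.filter_map]
    rw [List.filter_map]
    rw [List.map_map]
    rw [List.filter_filter]
    simp only [Function.comp_def]

    simp only [PySem.List.len_eq, List.length_map]
    rw [PySem.List.pyRange_one_append 0 ((k : Int) + 1) (vw.length : Int)
      (by omega) (by exact_mod_cast hk)]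
    rw [List.filter_append]
    have hnil : List.filter
        (fun a => decide ((k : Int) < a) &&
          ((PySem.List.sorted (PySem.List.pyGetD (vw.map PySem.Str.lower) a "").toList
            (fun x => x) false) == r))
        (PySem.List.pyRange 0 ((k : Int) + 1) 1) = [] := by
      apply List.filter_eq_nil_iff.mpr
      intro j hj
      have := PySem.List.mem_pyRange_one.mp hj
      simp only [Bool.and_eq_true, decide_eq_true_eq]
      rintro ⟨h1, -⟩
      omega
    rw [hnil, List.nil_append]
    have hget : ∀ j : Int, PySem.List.pyGetD (vw.map PySem.Str.lower) j "" =
        PySem.Str.lower (PySem.List.pyGetD vw j "") := by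
      intro j
      exact PySem.List.pyGetD_map PySem.Str.lower vw j ""
    have hfc : List.filter
        (fun a => decide ((k : Int) < a) &&
          ((PySem.List.sorted (PySem.List.pyGetD (vw.map PySem.Str.lower) a "").toList
            (fun x => x) false) == r))
        (PySem.List.pyRange ((k : Int) + 1) (vw.length : Int) 1)
        = List.filter (fun i => counterEq
            (PySem.Dict.counter ((PySem.Str.lower vw[k]).toList ++
              (PySem.Str.lower (PySem.List.pyGetD vw i "")).toList))
            (PySem.Dict.counter aw.toList))
          (PySem.List.pyRange ((k : Int) + 1) (vw.length : Int) 1) := by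
      apply List.filter_congr
      intro j hj
      have hjr := PySem.List.mem_pyRange_one.mp hj
      rw [Bool.eq_iff_iff]
      simp only [Bool.and_eq_true, decide_eq_true_eq, beq_iff_eq]
      rw [hget j, counterEq_iff]
      constructor
      · rintro ⟨h1, h2⟩
        exact (matches_iff _ _ _ hm).mpr h2
      · intro hp
        exact ⟨by omega, (matches_iff _ _ _ hm).mp hp⟩
    rw [hfc]
    exact (List.map_congr_left (fun j _ => by rw [hget])).symm

lemma main_eq (vw : List String) (aw : String) :
    find_valid_pairs vw aw = find_valid_pairs_alt vw aw := by
  rw [A_eq, B_eq, enumerate_map]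
  rw [List.flatMap_def, List.flatMap_def, List.map_map]
  refine congrArg List.flatten (List.map_congr_left ?_)
  intro p hp
  rcases (PySem.List.mem_enumerate_iff vw 0 p).mp hp with ⟨k, hkl, rfl⟩
  simp only [zero_add, Function.comp_apply]
  exact block_eq vw aw k hkl


-- ===== VERDICT (by name: the statement is the Claim_ definition above) =====
theorem find_valid_pairs_spec : Claim_equal_find_valid_pairs := by
  intro vw aw _
  exact main_eq vw aw
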